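-- pv_equiv track=rewrite | github.com/Tragoedie/on_server_learning | Courses_on_algorithms/algorithms_of_sorting/Shell_sort.py | KnuthSequence
-- ===== SOURCE A (Python) =====
-- def KnuthSequence(array_size):
--     if array_size == 0:
--         return [1]
--     number = 1
--     array = []
--     while number <= array_size:
--         array.append(number)
--         number = 3 * number + 1
--     array.reverse()
--     return array
-- ===== SOURCE B (Python) =====
-- def KnuthSequence(array_size):
--     if array_size == 0:
--         return [1]
--     k = 0
--     while (3 ** (k + 1) - 1) // 2 <= array_size:
--         k += 1
--     return [(3 ** (i + 1) - 1) // 2 for i in reversed(range(k))]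
-- ===== Notes on version B (the rewrite author's own statement) =====
-- stated objective: alternative
-- what changed: B uses the closed form for the Knuth gaps (a power of three minus one, halved): it first counts how many gaps fit below array_size and then emits them directly in descending order by a comprehension, instead of A's recurrence accumulator building an ascending list and reversing it.
import Mathlib
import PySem

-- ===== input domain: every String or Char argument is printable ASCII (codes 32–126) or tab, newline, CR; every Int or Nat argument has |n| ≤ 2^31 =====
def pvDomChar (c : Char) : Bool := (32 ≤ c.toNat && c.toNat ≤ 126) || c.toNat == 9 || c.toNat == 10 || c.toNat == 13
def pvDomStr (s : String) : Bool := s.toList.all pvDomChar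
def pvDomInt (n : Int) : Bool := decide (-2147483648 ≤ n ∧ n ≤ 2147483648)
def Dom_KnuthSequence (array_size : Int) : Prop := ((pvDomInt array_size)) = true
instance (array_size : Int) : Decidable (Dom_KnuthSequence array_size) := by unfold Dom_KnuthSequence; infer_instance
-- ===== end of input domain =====

-- B replaces A's 3*n+1 accumulator + reverse by the closed form (3^j - 1)//2, counting
-- the gaps and emitting them directly in descending order (objective: alternative).

-- ===== PORT A =====
-- A's while loop; `number` starts at 1 and stays positive, so it is carried as a Nat.
def KnuthLoop (array_size : Int) (number : Nat) (array : List Int) : List Int :=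
  if (number : Int) ≤ array_size then
    KnuthLoop array_size (3 * number + 1) (array ++ [(number : Int)])
  else array
termination_by (array_size + 1 - number).toNat
decreasing_by omega

def KnuthSequence (array_size : Int) : List Int :=
  if array_size = 0 then [1]
  else (KnuthLoop array_size 1 []).reverse

-- ===== PORT B =====
-- Source B's counting loop: smallest k with (3**(k+1)-1)//2 > array_size, starting from 0.
def KnuthCount (array_size : Int) (k : Nat) : Nat :=
  if PySem.Int.floordiv ((3 : Int) ^ (k + 1) - 1) 2 ≤ array_size then
    KnuthCount array_size (k + 1)
  else k
termination_by (2 * array_size + 3 - 3 ^ (k + 1)).toNat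
decreasing_by
  rename_i h
  rw [PySem.Int.floordiv_eq_ediv_of_pos (by omega)] at h
  have e2 : (3 : Int) ^ (k + 1 + 1) = 3 * 3 ^ (k + 1) := by ring
  rw [e2] at *
  have h1 : (1 : Int) ≤ 3 ^ (k + 1) := one_le_pow₀ (by omega)
  omega

def KnuthSequence_alt (array_size : Int) : List Int :=
  if array_size = 0 then [1]
  else
    ((List.range (KnuthCount array_size 0)).reverse).map
      (fun i => PySem.Int.floordiv ((3 : Int) ^ (i + 1) - 1) 2)

-- ===== PRECONDITION & SPEC =====
def Spec_KnuthSequence (array_size : Int) (out : List Int) : Prop := out = KnuthSequence_alt array_size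
instance (array_size : Int) (out : List Int) : Decidable (Spec_KnuthSequence array_size out) := by unfold Spec_KnuthSequence; infer_instance

-- ===== CLAIM (what is proved, stated in full; the proofs are below) =====
def Claim_equal_KnuthSequence : Prop := ∀ (array_size : Int), Dom_KnuthSequence array_size → Spec_KnuthSequence array_size (KnuthSequence array_size)

-- ===== LEMMAS AND PROOFS =====

-- A's Knuth numbers by index: nN j = 1, 4, 13, …
def nN : Nat → Nat
  | 0 => 1
  | j + 1 => 3 * nN j + 1

lemma nN_cast (j : Nat) : 2 * ((nN j : Int)) + 1 = 3 ^ (j + 1) := by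
  induction j with
  | zero => simp [nN]
  | succ j ih =>
      have : (3 : Int) ^ (j + 1 + 1) = 3 * 3 ^ (j + 1) := by ring
      simp only [nN]
      push_cast
      omega

lemma fval (j : Nat) :
    PySem.Int.floordiv ((3 : Int) ^ (j + 1) - 1) 2 = (nN j : Int) := by
  rw [PySem.Int.floordiv_eq_ediv_of_pos (by omega)]
  have := nN_cast j
  omega

lemma main_lemma (array_size : Int) :
    ∀ (m k : Nat) (acc : List Int),
      (2 * array_size + 3 - 3 ^ (k + 1)).toNat ≤ m →
      k ≤ KnuthCount array_size k ∧
      KnuthLoop array_size (nN k) acc =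
        acc ++ (List.range' k (KnuthCount array_size k - k)).map
          (fun i => PySem.Int.floordiv ((3 : Int) ^ (i + 1) - 1) 2) := by
  intro m
  induction m with
  | zero =>
      intro k acc hm
      have h1 : (1 : Int) ≤ 3 ^ (k + 1) := one_le_pow₀ (by omega)
      have hc : ¬ ((nN k : Int) ≤ array_size) := by
        intro h
        have := nN_cast k
        omega
      rw [KnuthLoop, if_neg hc, KnuthCount, if_neg (by rw [fval k]; exact hc)]
      simp
  | succ m ih =>
      intro k acc hm
      by_cases hc : (nN k : Int) ≤ array_size
      · have hck : PySem.Int.floordiv ((3 : Int) ^ (k + 1) - 1) 2 ≤ array_size := by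
          rw [fval k]; exact hc
        have h1 : (1 : Int) ≤ 3 ^ (k + 1) := one_le_pow₀ (by omega)
        have hnc := nN_cast k
        have hm' : (2 * array_size + 3 - 3 ^ (k + 1 + 1)).toNat ≤ m := by omega
        obtain ⟨hge, heq⟩ := ih (k + 1) (acc ++ [(nN k : Int)]) hm'
        have hcount : KnuthCount array_size k = KnuthCount array_size (k + 1) := by
          rw [KnuthCount, if_pos hck]
        constructor
        · omega
        · rw [KnuthLoop, if_pos hc]
          have : 3 * nN k + 1 = nN (k + 1) := rfl
          rw [this, heq, hcount]
          have hlen : KnuthCount array_size (k + 1) - k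
              = (KnuthCount array_size (k + 1) - (k + 1)) + 1 := by omega
          rw [hlen, List.range'_succ, List.map_cons, fval k]
          simp
      · have hnk : ¬ PySem.Int.floordiv ((3 : Int) ^ (k + 1) - 1) 2 ≤ array_size := by
          rw [fval k]; exact hc
        rw [KnuthLoop, if_neg hc, KnuthCount, if_neg hnk]
        simp

-- ===== VERDICT (by name: the statement is the Claim_ definition above) =====
theorem KnuthSequence_spec : Claim_equal_KnuthSequence := by
  intro array_size _
  unfold Spec_KnuthSequence KnuthSequence KnuthSequence_alt
  by_cases h0 : array_size = 0
  · simp [h0]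
  · rw [if_neg h0, if_neg h0]
    obtain ⟨-, heq⟩ := main_lemma array_size
      (2 * array_size + 3 - 3 ^ (0 + 1)).toNat 0 [] le_rfl
    rw [show (1:Nat) = nN 0 from rfl, heq]
    simp [List.range_eq_range', List.map_reverse]
    exact fun a _ => rfl
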